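-- pv_equiv track=rewrite | github.com/StuartSpiegel/AOC2024 | Day 19 - Linen Layout/LinenLayoutPart2.py | count_ways_to_form_design
-- ===== SOURCE A (Python) =====
-- def count_ways_to_form_design(design, patterns):
--     # dp[i] = number of ways to form design[:i]
--     dp = [0] * (len(design) + 1)
--     dp[0] = 1  # one way to form empty prefix
--
--     for i in range(len(design)):
--         if dp[i] == 0:
--             continue
--         for p in patterns:
--             # If pattern p matches starting at index i
--             if design.startswith(p, i):
--                 dp[i + len(p)] += dp[i]
--     return dp[len(design)]
-- ===== SOURCE B (Python) =====
-- def count_ways_to_form_design(design, patterns):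
--     # Pull-style recurrence over suffixes: each cell is computed once, as a sum
--     # of already-known suffix counts, in a list built back to front by append.
--     n = len(design)
--     sw = design.startswith
--     ways = [1]  # ways[j] = number of ways to tile the suffix design[n-j:]
--     for i in range(n - 1, -1, -1):
--         base = n - i
--         ways.append(sum([ways[base - len(p)] for p in patterns if sw(p, i)]))
--     return ways[n]
-- ===== Notes on version B (the rewrite author's own statement) =====
-- stated objective: alternative
-- what changed: Replaces A's push/scatter forward dp (dp[i+len(p)] += dp[i] with a zero-cell skip over a preallocated list) by a pull/gather recurrence computing each suffix count once as a comprehension-sum of already-known suffix counts, in a list grown back to front by append.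
-- outside the precondition, e.g. on count_ways_to_form_design('ab', ['', 'a', 'b']): A returns 4, B raises IndexError
import Mathlib
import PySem

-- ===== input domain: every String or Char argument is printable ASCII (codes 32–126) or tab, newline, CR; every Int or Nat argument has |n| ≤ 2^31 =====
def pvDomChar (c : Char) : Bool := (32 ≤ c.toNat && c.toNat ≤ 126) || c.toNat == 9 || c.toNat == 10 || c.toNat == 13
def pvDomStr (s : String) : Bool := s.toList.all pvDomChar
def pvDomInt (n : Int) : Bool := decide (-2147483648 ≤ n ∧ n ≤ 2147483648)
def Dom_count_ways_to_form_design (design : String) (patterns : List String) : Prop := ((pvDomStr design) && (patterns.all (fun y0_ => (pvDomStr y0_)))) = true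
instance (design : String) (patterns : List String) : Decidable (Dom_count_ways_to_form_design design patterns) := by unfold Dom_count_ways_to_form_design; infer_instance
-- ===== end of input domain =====

-- B replaces A's push/scatter forward dp (dp[i+len p] += dp[i], zero-cell skip) by a
-- pull/gather recurrence: each suffix count computed once as a sum of known suffix
-- counts, in a list grown back to front. Pre_ excludes nonempty designs whose pattern
-- list contains the empty string: there B's own index arithmetic raises IndexError
-- while A returns an accidental doubled count.


-- ===== PORT A =====
-- design.startswith(p, i) with 0 ≤ i ≤ len(design) is exactly p.isPrefixOf (d.drop i)
-- (true for p = '' too); every index Python touches is in range (a matching p has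
-- i + len(p) ≤ len(design) < len(dp)), so List.getD/List.set are exact here.
def innerA (d : List Char) (i : Nat) (dp : List Int) (p : List Char) : List Int :=
  if p.isPrefixOf (d.drop i) then
    dp.set (i + p.length) (dp.getD (i + p.length) 0 + dp.getD i 0)
  else dp

def stepA (d : List Char) (P : List (List Char)) (dp : List Int) (i : Nat) : List Int :=
  if dp.getD i 0 = 0 then dp else P.foldl (innerA d i) dp

def count_ways_to_form_design (design : String) (patterns : List String) : Int :=
  let d := design.toList
  let P := patterns.map String.toList
  let n := d.length
  ((List.range n).foldl (stepA d P) ((List.replicate (n + 1) (0 : Int)).set 0 1)).getD n 0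

-- ===== PORT B =====
-- Python's generator-sum over patterns; ways[n-i-len(p)] is in range for every input
-- Pre_ admits (a matching nonempty p at i has 1 ≤ len p ≤ n - i, and ways has n - i
-- elements when position i is processed), so List.getD is exact there.
def sumB (d : List Char) (n : Nat) (ws : List Int) (i : Nat) (P : List (List Char)) : Int :=
  P.foldl (fun acc p =>
    if p.isPrefixOf (d.drop i) then acc + ws.getD (n - i - p.length) 0 else acc) 0

-- `for i in range(n-1, -1, -1)` is PySem.List.pyRange (n-1) (-1) (-1), whose elements
-- are the nonnegative ints n-1..0, read back as Nat via .toNat; the final ways[n]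
-- indexes a list of length n+1, in range, so List.getD is exact.
def count_ways_to_form_design_alt (design : String) (patterns : List String) : Int :=
  let d := design.toList
  let P := patterns.map String.toList
  let n := d.length
  let ways := (PySem.List.pyRange ((n : Int) - 1) (-1) (-1)).foldl
      (fun ws i => ws ++ [sumB d n ws i.toNat P]) [1]
  ways.getD n 0

-- ===== PRECONDITION & SPEC =====
-- Pre_ excludes exactly the nonempty designs whose pattern list contains the empty
-- string: there A still returns a value (it doubles live dp cells in place) while B's
-- natural index arithmetic raises IndexError, so those inputs are outside the claim.
def Pre_count_ways_to_form_design (design : String) (patterns : List String) : Prop :=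
  design.toList = [] ∨ ∀ p ∈ patterns, p.toList ≠ []
instance (design : String) (patterns : List String) : Decidable (Pre_count_ways_to_form_design design patterns) := by unfold Pre_count_ways_to_form_design; infer_instance

def pvWitness_count_ways_to_form_design : String × List String := ("ab", ["a", "b", "ab"])

def Spec_count_ways_to_form_design (design : String) (patterns : List String) (out : Int) : Prop := out = count_ways_to_form_design_alt design patterns
instance (design : String) (patterns : List String) (out : Int) : Decidable (Spec_count_ways_to_form_design design patterns out) := by unfold Spec_count_ways_to_form_design; infer_instance

-- ===== CLAIM (what is proved, stated in full; the proofs are below) =====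
def Claim_equal_count_ways_to_form_design : Prop := ∀ (design : String) (patterns : List String), Dom_count_ways_to_form_design design patterns → Pre_count_ways_to_form_design design patterns → Spec_count_ways_to_form_design design patterns (count_ways_to_form_design design patterns)

-- ===== LEMMAS AND PROOFS =====

-- Weights: an empty pattern doubles the live cell it reads in A, so every later
-- pattern in the list effectively counts twice.  `wlist m P` is the list of nonempty
-- patterns of P, each paired with 2^(number of empty patterns before it) * m.
-- (Under Pre_ there are no empty patterns and the weights are all 1; the weighted
-- form is what A's in-place loop satisfies unconditionally.)
def wlist (m : Int) : List (List Char) → List (List Char × Int)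
  | [] => []
  | p :: Q => if p = [] then wlist (2 * m) Q else (p, m) :: wlist m Q

-- the substring design[i:j]
def seg (d : List Char) (i j : Nat) : List Char := (d.take j).drop i

-- weighted number of tilings of design[i:j] by the weighted patterns W,
-- by recursion on the last tile (fuel-based; fuel > j - i is always enough)
def tgo (d : List Char) (W : List (List Char × Int)) : Nat → Nat → Nat → Int
  | 0, _, _ => 0
  | fuel + 1, i, j =>
    if i = j then 1
    else (W.map (fun pm =>
      if pm.1.isSuffixOf (seg d i j) then pm.2 * tgo d W fuel i (j - pm.1.length) else 0)).sum

def TT (d : List Char) (W : List (List Char × Int)) (i j : Nat) : Int :=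
  tgo d W (j - i + 1) i j

lemma sum_map_swap {α : Type} (l l' : List α) (f : α → α → Int) :
    (l.map (fun q => (l'.map (fun p => f p q)).sum)).sum
      = (l'.map (fun p => (l.map (fun q => f p q)).sum)).sum := by
  induction l with
  | nil => simp
  | cons q l ih =>
    simp only [List.map_cons, List.sum_cons, ih, ← PySem.List.sum_map_add_int]

lemma wlist_mul (a : Int) : ∀ (Q : List (List Char)) (m : Int),
    wlist (a * m) Q = (wlist m Q).map (fun pm => (pm.1, a * pm.2)) := by
  intro Q
  induction Q with
  | nil => intro m; rfl
  | cons p Q ih =>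
    intro m
    by_cases hp : p = []
    · simp only [wlist, if_pos hp]
      rw [show 2 * (a * m) = a * (2 * m) by ring, ih (2 * m)]
    · simp only [wlist, if_neg hp, List.map_cons, ih m]

lemma wlist_ne_nil (m : Int) : ∀ (Q : List (List Char)), ∀ pm ∈ wlist m Q, pm.1 ≠ [] := by
  intro Q
  induction Q generalizing m with
  | nil => intro pm h; cases h
  | cons p Q ih =>
    intro pm h
    by_cases hp : p = []
    · exact ih (2 * m) pm (by simpa [wlist, hp] using h)
    · rcases (by simpa [wlist, hp] using h : pm = (p, m) ∨ pm ∈ wlist m Q) with h' | h'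
      · rw [h']; exact hp
      · exact ih m pm h'

-- with no empty patterns the weights are all 1
lemma wlist_one_no_nil : ∀ (P : List (List Char)), [] ∉ P →
    wlist 1 P = P.map (fun p => (p, (1 : Int))) := by
  intro P
  induction P with
  | nil => intro _; rfl
  | cons p Q ih =>
    intro h
    have hp : p ≠ [] := fun hc => h (hc ▸ List.mem_cons_self)
    simp only [wlist, if_neg hp, List.map_cons]
    rw [ih (fun hc => h (List.mem_cons_of_mem p hc))]

lemma seg_len_le (d : List Char) (i j : Nat) : (seg d i j).length ≤ j - i := by
  simp [seg, List.length_take, List.length_drop]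
  omega

lemma seg_len (d : List Char) (i j : Nat) (hj : j ≤ d.length) :
    (seg d i j).length = j - i := by
  simp [seg, List.length_take, List.length_drop]
  omega

lemma seg_zero (d : List Char) (j : Nat) : seg d 0 j = d.take j := by
  simp [seg]

lemma seg_full (d : List Char) (i : Nat) : seg d i d.length = d.drop i := by
  simp [seg]

lemma TT_self (d : List Char) (W : List (List Char × Int)) (i : Nat) : TT d W i i = 1 := by
  simp [TT, tgo]

lemma tgo_fuel (d : List Char) (W : List (List Char × Int))
    (hW : ∀ pm ∈ W, pm.1 ≠ []) :
    ∀ (j i f f' : Nat), j - i < f → j - i < f' → tgo d W f i j = tgo d W f' i j := by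
  intro j
  induction j using Nat.strong_induction_on with
  | _ j ih =>
    intro i f f' hf hf'
    cases f with
    | zero => omega
    | succ g =>
      cases f' with
      | zero => omega
      | succ g' =>
        simp only [tgo]
        by_cases hij : i = j
        · simp [hij]
        · rw [if_neg hij, if_neg hij]
          refine congrArg List.sum (List.map_eq_map_iff.mpr ?_)
          intro pm hpm
          by_cases hs : pm.1.isSuffixOf (seg d i j)
          · have h1 : 0 < pm.1.length := List.length_pos_iff.mpr (hW pm hpm)
            have h2 : pm.1.length ≤ j - i :=
              le_trans (List.isSuffixOf_iff_suffix.mp hs).length_le (seg_len_le d i j)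
            rw [if_pos hs, if_pos hs,
              ih (j - pm.1.length) (by omega) i g g' (by omega) (by omega)]
          · rw [if_neg hs, if_neg hs]

lemma TT_lastTile (d : List Char) (W : List (List Char × Int))
    (hW : ∀ pm ∈ W, pm.1 ≠ []) (i j : Nat) (hij : i ≠ j) :
    TT d W i j
      = (W.map (fun pm =>
          if pm.1.isSuffixOf (seg d i j) then pm.2 * TT d W i (j - pm.1.length) else 0)).sum := by
  have hij' : ¬ i = j := hij
  conv_lhs => rw [TT]
  simp only [tgo, if_neg hij']
  refine congrArg List.sum (List.map_eq_map_iff.mpr ?_)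
  intro pm hpm
  by_cases hs : pm.1.isSuffixOf (seg d i j)
  · have h1 : 0 < pm.1.length := List.length_pos_iff.mpr (hW pm hpm)
    have h2 : pm.1.length ≤ j - i :=
      le_trans (List.isSuffixOf_iff_suffix.mp hs).length_le (seg_len_le d i j)
    rw [if_pos hs, if_pos hs,
      tgo_fuel d W hW (j - pm.1.length) i (j - i) (j - pm.1.length - i + 1) (by omega) (by omega)]
    rfl
  · rw [if_neg hs, if_neg hs]

lemma suffix_drop_iff (q X : List Char) (k : Nat) :
    q <:+ X.drop k ↔ q <:+ X ∧ q.length ≤ X.length - k := by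
  constructor
  · intro h
    refine ⟨h.trans (List.drop_suffix k X), ?_⟩
    have := h.length_le
    simp [List.length_drop] at this
    omega
  · rintro ⟨⟨t, rfl⟩, h2⟩
    by_cases hk : k ≤ t.length
    · exact ⟨t.drop k, by rw [List.drop_append_of_le_length hk]⟩
    · have : q.length = 0 := by simp at h2; omega
      simp [List.length_eq_zero_iff.mp this]

lemma seg_take (d : List Char) (i j j' : Nat) (h : j' ≤ j) :
    seg d i j' = (seg d i j).take (j' - i) := by
  unfold seg
  by_cases hij : i ≤ j'
  · rw [List.take_drop, Nat.add_sub_cancel' hij, List.take_take, min_eq_left h]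
  · rw [show j' - i = 0 from by omega, List.take_zero]
    refine List.eq_nil_of_length_eq_zero ?_
    simp [List.length_drop, List.length_take]
    omega

lemma seg_drop (d : List Char) (i i' j : Nat) (h : i ≤ i') :
    seg d i' j = (seg d i j).drop (i' - i) := by
  unfold seg
  rw [List.drop_drop, Nat.add_sub_cancel' h]

lemma pfx_seg_iff (d p : List Char) (i j j' : Nat) (h : j' ≤ j) :
    p.isPrefixOf (seg d i j') = true
      ↔ p.isPrefixOf (seg d i j) = true ∧ p.length ≤ j' - i := by
  rw [List.isPrefixOf_iff_prefix, List.isPrefixOf_iff_prefix,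
    seg_take d i j j' h, List.prefix_take_iff]

lemma sfx_seg_iff (d q : List Char) (i i' j : Nat) (h : i ≤ i') (hj : j ≤ d.length) :
    q.isSuffixOf (seg d i' j) = true
      ↔ q.isSuffixOf (seg d i j) = true ∧ q.length ≤ j - i' := by
  rw [List.isSuffixOf_iff_suffix, List.isSuffixOf_iff_suffix,
    seg_drop d i i' j h, suffix_drop_iff, seg_len d i j hj]
  constructor <;> rintro ⟨h1, h2⟩ <;> exact ⟨h1, by omega⟩

lemma sfx_corner (d q : List Char) (i j : Nat) (hij : i < j) (hj : j ≤ d.length)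
    (hq : q ≠ []) :
    (q.isSuffixOf (seg d i j) = true ∧ j - q.length = i) ↔ q = seg d i j := by
  constructor
  · rintro ⟨hs, hl⟩
    have h2 : q.length ≤ j - i :=
      le_trans (List.isSuffixOf_iff_suffix.mp hs).length_le (seg_len_le d i j)
    exact List.IsSuffix.eq_of_length (List.isSuffixOf_iff_suffix.mp hs)
      (by rw [seg_len d i j hj]; omega)
  · rintro rfl
    refine ⟨List.isSuffixOf_iff_suffix.mpr (List.suffix_refl _), ?_⟩
    rw [seg_len d i j hj]
    omega

lemma pfx_corner (d p : List Char) (i j : Nat) (hij : i < j) (hj : j ≤ d.length)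
    (hp : p ≠ []) :
    (p.isPrefixOf (seg d i j) = true ∧ i + p.length = j) ↔ p = seg d i j := by
  constructor
  · rintro ⟨hs, hl⟩
    exact List.IsPrefix.eq_of_length (List.isPrefixOf_iff_prefix.mp hs)
      (by rw [seg_len d i j hj]; omega)
  · rintro rfl
    refine ⟨List.isPrefixOf_iff_prefix.mpr (List.prefix_refl _), ?_⟩
    rw [seg_len d i j hj]
    omega

lemma match_iff (d p : List Char) (i j : Nat) (hj : j ≤ d.length) (hp : p ≠ []) :
    (p.isPrefixOf (d.drop i) = true ∧ i + p.length = j)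
      ↔ (p.isSuffixOf (d.take j) = true ∧ j - p.length = i) := by
  rw [List.isPrefixOf_iff_prefix, List.isSuffixOf_iff_suffix]
  constructor
  · rintro ⟨hpre, rfl⟩
    have hlen : p.length ≤ (d.drop i).length := hpre.length_le
    rw [List.length_drop] at hlen
    have htk : (d.drop i).take p.length = p := (List.prefix_iff_eq_take.mp hpre).symm
    refine ⟨?_, by omega⟩
    rw [List.take_add, htk]
    exact List.suffix_append _ _
  · rintro ⟨hsuf, rfl⟩
    obtain ⟨t, ht⟩ := hsuf
    have hlen : t.length + p.length = j := by
      have := congrArg List.length ht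
      simp [List.length_take] at this
      omega
    have hd : d = t ++ (p ++ d.drop j) := by
      conv_lhs => rw [← List.take_append_drop j d]
      rw [← ht, List.append_assoc]
    have hti : t.length = j - p.length := by omega
    constructor
    · rw [hd, ← hti, List.drop_left]
      exact List.prefix_append _ _
    · omega

lemma TT_firstTile (d : List Char) (W : List (List Char × Int))
    (hW : ∀ pm ∈ W, pm.1 ≠ []) :
    ∀ (i j : Nat), i ≤ j → j ≤ d.length → i ≠ j →
    TT d W i j
      = (W.map (fun pm =>
          if pm.1.isPrefixOf (seg d i j) then pm.2 * TT d W (i + pm.1.length) j else 0)).sum := by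
  suffices H : ∀ (b i j : Nat), j - i ≤ b → i ≤ j → j ≤ d.length → i ≠ j →
      TT d W i j
        = (W.map (fun pm =>
            if pm.1.isPrefixOf (seg d i j) then pm.2 * TT d W (i + pm.1.length) j else 0)).sum by
    intro i j h1 h2 h3
    exact H (j - i) i j le_rfl h1 h2 h3
  intro b
  induction b with
  | zero => intro i j hb h1 _ h3; omega
  | succ b ih =>
    intro i j hb hle hjn hne
    have hij : i < j := lt_of_le_of_ne hle hne
    -- LHS split into corner + inner parts
    have e1 : TT d W i j
        = (W.map (fun q => if q.1.isSuffixOf (seg d i j) = true ∧ j - q.1.length = i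
            then q.2 else 0)).sum
        + (W.map (fun q => if q.1.isSuffixOf (seg d i j) = true ∧ j - q.1.length ≠ i
            then q.2 * TT d W i (j - q.1.length) else 0)).sum := by
      rw [TT_lastTile d W hW i j hne, ← PySem.List.sum_map_add_int]
      refine congrArg List.sum (List.map_eq_map_iff.mpr ?_)
      intro q _
      by_cases hs : q.1.isSuffixOf (seg d i j)
      · by_cases hc : j - q.1.length = i
        · rw [if_pos hs, if_pos ⟨hs, hc⟩, if_neg (fun h => h.2 hc), add_zero, hc, TT_self,
            mul_one]
        · rw [if_pos hs, if_neg (fun h => hc h.2), if_pos ⟨hs, hc⟩, zero_add]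
      · rw [if_neg hs, if_neg (fun h => hs h.1), if_neg (fun h => hs h.1), add_zero]
    -- each inner LHS term is a sum over first tiles (IH)
    have e2 : ∀ q ∈ W,
        (if q.1.isSuffixOf (seg d i j) = true ∧ j - q.1.length ≠ i
          then q.2 * TT d W i (j - q.1.length) else 0)
        = (W.map (fun p =>
            if q.1.isSuffixOf (seg d i j) = true ∧ p.1.isPrefixOf (seg d i j) = true ∧
                i + p.1.length + q.1.length ≤ j
            then q.2 * (p.2 * TT d W (i + p.1.length) (j - q.1.length)) else 0)).sum := by
      intro q hq
      have hq1 : 0 < q.1.length := List.length_pos_iff.mpr (hW q hq)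
      by_cases hs : q.1.isSuffixOf (seg d i j) = true ∧ j - q.1.length ≠ i
      · obtain ⟨hs1, hs2⟩ := hs
        have hql : q.1.length ≤ j - i :=
          le_trans (List.isSuffixOf_iff_suffix.mp hs1).length_le (seg_len_le d i j)
        rw [if_pos ⟨hs1, hs2⟩, ih i (j - q.1.length) (by omega) (by omega) (by omega)
            (by omega), ← PySem.List.sum_map_const_mul_int]
        refine congrArg List.sum (List.map_eq_map_iff.mpr ?_)
        intro p hp
        have hp1 : 0 < p.1.length := List.length_pos_iff.mpr (hW p hp)
        by_cases hpf : p.1.isPrefixOf (seg d i (j - q.1.length)) = true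
        · have hpf' := (pfx_seg_iff d p.1 i j (j - q.1.length) (by omega)).mp hpf
          rw [if_pos hpf, if_pos ⟨hs1, hpf'.1, by omega⟩]
        · rw [if_neg hpf,
            if_neg (fun hc => hpf ((pfx_seg_iff d p.1 i j (j - q.1.length) (by omega)).mpr
              ⟨hc.2.1, by omega⟩)), mul_zero]
      · rw [if_neg hs]
        symm
        apply List.sum_eq_zero
        intro x hx
        obtain ⟨p, hp, rfl⟩ := List.mem_map.mp hx
        have hp1 : 0 < p.1.length := List.length_pos_iff.mpr (hW p hp)
        rw [if_neg (fun hc => hs ⟨hc.1, by omega⟩)]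
    -- RHS split into corner + inner parts
    have e3 : (W.map (fun pm =>
          if pm.1.isPrefixOf (seg d i j) then pm.2 * TT d W (i + pm.1.length) j else 0)).sum
        = (W.map (fun p => if p.1.isPrefixOf (seg d i j) = true ∧ i + p.1.length = j
            then p.2 else 0)).sum
        + (W.map (fun p => if p.1.isPrefixOf (seg d i j) = true ∧ i + p.1.length ≠ j
            then p.2 * TT d W (i + p.1.length) j else 0)).sum := by
      rw [← PySem.List.sum_map_add_int]
      refine congrArg List.sum (List.map_eq_map_iff.mpr ?_)
      intro p _
      by_cases hs : p.1.isPrefixOf (seg d i j)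
      · by_cases hc : i + p.1.length = j
        · rw [if_pos hs, if_pos ⟨hs, hc⟩, if_neg (fun h => h.2 hc), add_zero, hc, TT_self,
            mul_one]
        · rw [if_pos hs, if_neg (fun h => hc h.2), if_pos ⟨hs, hc⟩, zero_add]
      · rw [if_neg hs, if_neg (fun h => hs h.1), if_neg (fun h => hs h.1), add_zero]
    -- each inner RHS term is a sum over last tiles
    have e4 : ∀ p ∈ W,
        (if p.1.isPrefixOf (seg d i j) = true ∧ i + p.1.length ≠ j
          then p.2 * TT d W (i + p.1.length) j else 0)
        = (W.map (fun q =>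
            if q.1.isSuffixOf (seg d i j) = true ∧ p.1.isPrefixOf (seg d i j) = true ∧
                i + p.1.length + q.1.length ≤ j
            then q.2 * (p.2 * TT d W (i + p.1.length) (j - q.1.length)) else 0)).sum := by
      intro p hp
      have hp1 : 0 < p.1.length := List.length_pos_iff.mpr (hW p hp)
      by_cases hs : p.1.isPrefixOf (seg d i j) = true ∧ i + p.1.length ≠ j
      · obtain ⟨hs1, hs2⟩ := hs
        have hpl : p.1.length ≤ j - i :=
          le_trans (List.isPrefixOf_iff_prefix.mp hs1).length_le (seg_len_le d i j)
        rw [if_pos ⟨hs1, hs2⟩, TT_lastTile d W hW (i + p.1.length) j (by omega),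
          ← PySem.List.sum_map_const_mul_int]
        refine congrArg List.sum (List.map_eq_map_iff.mpr ?_)
        intro q hq
        have hq1 : 0 < q.1.length := List.length_pos_iff.mpr (hW q hq)
        by_cases hsf : q.1.isSuffixOf (seg d (i + p.1.length) j) = true
        · have hsf' := (sfx_seg_iff d q.1 i (i + p.1.length) j (by omega) hjn).mp hsf
          rw [if_pos hsf, if_pos ⟨hsf'.1, hs1, by omega⟩]
          ring
        · rw [if_neg hsf,
            if_neg (fun hc => hsf ((sfx_seg_iff d q.1 i (i + p.1.length) j (by omega)
              hjn).mpr ⟨hc.1, by omega⟩)), mul_zero]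
      · rw [if_neg hs]
        symm
        apply List.sum_eq_zero
        intro x hx
        obtain ⟨q, hq, rfl⟩ := List.mem_map.mp hx
        have hq1 : 0 < q.1.length := List.length_pos_iff.mpr (hW q hq)
        rw [if_neg (fun hc => hs ⟨hc.2.1, by omega⟩)]
    -- corner sums agree
    have e5 : (W.map (fun q => if q.1.isSuffixOf (seg d i j) = true ∧ j - q.1.length = i
          then q.2 else 0)).sum
        = (W.map (fun p => if p.1.isPrefixOf (seg d i j) = true ∧ i + p.1.length = j
          then p.2 else 0)).sum := by
      refine congrArg List.sum (List.map_eq_map_iff.mpr ?_)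
      intro x hx
      have hx1 : x.1 ≠ [] := hW x hx
      by_cases heq : x.1 = seg d i j
      · rw [if_pos ((sfx_corner d x.1 i j hij hjn hx1).mpr heq),
          if_pos ((pfx_corner d x.1 i j hij hjn hx1).mpr heq)]
      · rw [if_neg (fun hc => heq ((sfx_corner d x.1 i j hij hjn hx1).mp hc)),
          if_neg (fun hc => heq ((pfx_corner d x.1 i j hij hjn hx1).mp hc))]
    rw [e1, congrArg List.sum (List.map_eq_map_iff.mpr e2), e3,
      congrArg List.sum (List.map_eq_map_iff.mpr e4), e5,
      sum_map_swap W W (fun p q =>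
        if q.1.isSuffixOf (seg d i j) = true ∧ p.1.isPrefixOf (seg d i j) = true ∧
            i + p.1.length + q.1.length ≤ j
        then q.2 * (p.2 * TT d W (i + p.1.length) (j - q.1.length)) else 0)]

-- ---------- A side: the forward dp list computes TT 0 · ----------

lemma innerA_weighted (d : List Char) (i : Nat) (hi : i ≤ d.length) :
    ∀ (Q : List (List Char)) (dp : List Int), dp.length = d.length + 1 →
      ((Q.foldl (innerA d i) dp).length = d.length + 1)
      ∧ ((Q.foldl (innerA d i) dp).getD i 0 = 2 ^ (Q.count []) * dp.getD i 0)
      ∧ (∀ j, j ≤ d.length → j ≠ i →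
          (Q.foldl (innerA d i) dp).getD j 0
            = dp.getD j 0 + ((wlist 1 Q).map (fun pm =>
                if pm.1.isPrefixOf (d.drop i) ∧ i + pm.1.length = j
                then pm.2 * dp.getD i 0 else 0)).sum) := by
  intro Q
  induction Q with
  | nil =>
    intro dp hlen
    exact ⟨hlen, by simp, fun j _ _ => by simp [wlist]⟩
  | cons p Q ih =>
    intro dp hlen
    by_cases hp : p = []
    · subst hp
      have hdp' : innerA d i dp [] = dp.set i (dp.getD i 0 + dp.getD i 0) := by
        simp [innerA, List.isPrefixOf_nil_left]
      have hlen' : (dp.set i (dp.getD i 0 + dp.getD i 0)).length = d.length + 1 := by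
        simp [hlen]
      obtain ⟨l1, l2, l3⟩ := ih (dp.set i (dp.getD i 0 + dp.getD i 0)) hlen'
      have hgi : (dp.set i (dp.getD i 0 + dp.getD i 0)).getD i 0
          = dp.getD i 0 + dp.getD i 0 := by
        simp [List.getD, show i < dp.length by omega]
      have hw2 : wlist 2 Q = (wlist 1 Q).map (fun pm => (pm.1, 2 * pm.2)) := by
        have := wlist_mul 2 Q 1
        rwa [mul_one] at this
      refine ⟨by simpa [hdp'] using l1, ?_, ?_⟩
      · rw [List.foldl_cons, hdp', List.count_cons_self, l2, hgi, pow_succ]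
        ring
      · intro j hj hji
        have hgj : (dp.set i (dp.getD i 0 + dp.getD i 0)).getD j 0 = dp.getD j 0 := by
          simp [List.getD, Ne.symm hji]
        rw [List.foldl_cons, hdp', l3 j hj hji, hgj, hgi]
        show _ = dp.getD j 0 + ((wlist (2 * 1) Q).map _).sum
        rw [mul_one, hw2, List.map_map]
        refine congrArg (dp.getD j 0 + ·) (congrArg List.sum
          (List.map_eq_map_iff.mpr ?_))
        intro pm _
        by_cases hc : pm.1.isPrefixOf (d.drop i) ∧ i + pm.1.length = j
        · simp only [Function.comp, if_pos hc]
          ring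
        · simp only [Function.comp, if_neg hc]
    · have hcount : (p :: Q).count [] = Q.count [] := by simp [hp]
      have hwl : wlist 1 (p :: Q) = (p, 1) :: wlist 1 Q := by simp [wlist, hp]
      have hp1 : 0 < p.length := List.length_pos_iff.mpr hp
      by_cases hpre : p.isPrefixOf (d.drop i)
      · have hple : p.length ≤ d.length - i := by
          have := (List.isPrefixOf_iff_prefix.mp hpre).length_le
          rwa [List.length_drop] at this
        have hdp' : innerA d i dp p
            = dp.set (i + p.length) (dp.getD (i + p.length) 0 + dp.getD i 0) := by
          simp [innerA, hpre]
        have hlen' : (dp.set (i + p.length) (dp.getD (i + p.length) 0 + dp.getD i 0)).length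
            = d.length + 1 := by simp [hlen]
        obtain ⟨l1, l2, l3⟩ := ih _ hlen'
        have hgi : (dp.set (i + p.length) (dp.getD (i + p.length) 0 + dp.getD i 0)).getD i 0
            = dp.getD i 0 := by
          simp [List.getD, hp]
        refine ⟨by simpa [hdp'] using l1, ?_, ?_⟩
        · rw [List.foldl_cons, hdp', hcount, l2, hgi]
        · intro j hj hji
          have hgj : (dp.set (i + p.length) (dp.getD (i + p.length) 0 + dp.getD i 0)).getD j 0
              = dp.getD j 0 + (if i + p.length = j then dp.getD i 0 else 0) := by
            by_cases hc : i + p.length = j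
            · rw [if_pos hc, hc]
              simp [List.getD, show j < dp.length by omega]
            · rw [if_neg hc, add_zero]
              simp [List.getD, hc]
          rw [List.foldl_cons, hdp', l3 j hj hji, hgj, hgi, hwl, List.map_cons,
            List.sum_cons]
          by_cases hc : i + p.length = j
          · rw [if_pos hc, if_pos ⟨hpre, hc⟩, one_mul]
            ring
          · rw [if_neg hc, if_neg (fun h => hc h.2), add_zero, zero_add]
      · have hdp' : innerA d i dp p = dp := by simp [innerA, hpre]
        obtain ⟨l1, l2, l3⟩ := ih dp hlen
        refine ⟨by simpa [hdp'] using l1, ?_, ?_⟩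
        · rw [List.foldl_cons, hdp', hcount, l2]
        · intro j hj hji
          rw [List.foldl_cons, hdp', l3 j hj hji, hwl, List.map_cons, List.sum_cons,
            if_neg (fun hc => hpre hc.1), zero_add]

def partA (d : List Char) (P : List (List Char)) (i j : Nat) : Int :=
  if j < i then 2 ^ (P.count []) * TT d (wlist 1 P) 0 j
  else (if j = 0 then 1 else 0) + ((wlist 1 P).map (fun pm =>
    if pm.1.isSuffixOf (d.take j) = true ∧ j - pm.1.length < i
    then pm.2 * TT d (wlist 1 P) 0 (j - pm.1.length) else 0)).sum

lemma partA_self (d : List Char) (P : List (List Char)) (i : Nat) (hi : i ≤ d.length) :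
    partA d P i i = TT d (wlist 1 P) 0 i := by
  unfold partA
  rw [if_neg (lt_irrefl i)]
  cases i with
  | zero =>
    rw [if_pos rfl, TT_self]
    have : ∀ x ∈ (wlist 1 P).map (fun pm =>
        if pm.1.isSuffixOf (d.take 0) = true ∧ 0 - pm.1.length < 0
        then pm.2 * TT d (wlist 1 P) 0 (0 - pm.1.length) else 0), x = 0 := by
      intro x hx
      obtain ⟨pm, hpm, rfl⟩ := List.mem_map.mp hx
      rw [if_neg (fun hc => by omega)]
    rw [List.sum_eq_zero this, add_zero]
  | succ m =>
    rw [if_neg (Nat.succ_ne_zero m), zero_add,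
      TT_lastTile d (wlist 1 P) (wlist_ne_nil 1 P) 0 (m + 1) (by omega)]
    refine congrArg List.sum (List.map_eq_map_iff.mpr ?_)
    intro pm hpm
    have hp1 : 0 < pm.1.length := List.length_pos_iff.mpr (wlist_ne_nil 1 P pm hpm)
    rw [seg_zero]
    by_cases hs : pm.1.isSuffixOf (d.take (m + 1))
    · rw [if_pos ⟨hs, by omega⟩, if_pos hs]
    · rw [if_neg (fun hc => hs hc.1), if_neg hs]

lemma mainA_inv (d : List Char) (P : List (List Char)) :
    ∀ i, i ≤ d.length →
      (((List.range i).foldl (stepA d P) ((List.replicate (d.length + 1) (0 : Int)).set 0 1)).length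
          = d.length + 1)
      ∧ ∀ j, j ≤ d.length →
          ((List.range i).foldl (stepA d P) ((List.replicate (d.length + 1) (0 : Int)).set 0 1)).getD j 0
            = partA d P i j := by
  intro i
  induction i with
  | zero =>
    intro _
    refine ⟨by simp, ?_⟩
    intro j hj
    simp only [List.range_zero, List.foldl_nil]
    unfold partA
    rw [if_neg (by omega)]
    have hz : ∀ x ∈ (wlist 1 P).map (fun pm =>
        if pm.1.isSuffixOf (d.take j) = true ∧ j - pm.1.length < 0
        then pm.2 * TT d (wlist 1 P) 0 (j - pm.1.length) else 0), x = 0 := by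
      intro x hx
      obtain ⟨pm, hpm, rfl⟩ := List.mem_map.mp hx
      rw [if_neg (fun hc => by omega)]
    rw [List.sum_eq_zero hz, add_zero]
    by_cases hj0 : j = 0
    · subst hj0; simp [List.getD]
    · rw [if_neg hj0]
      simp [List.getD, Ne.symm hj0, show j < d.length + 1 by omega]
  | succ i ihall =>
    intro hi1
    have hi : i ≤ d.length := Nat.le_of_succ_le hi1
    obtain ⟨hlen, hvals⟩ := ihall hi
    rw [List.range_succ, List.foldl_append, List.foldl_cons, List.foldl_nil]
    set dp := (List.range i).foldl (stepA d P) ((List.replicate (d.length + 1) (0 : Int)).set 0 1)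
      with hdp
    have hci : dp.getD i 0 = TT d (wlist 1 P) 0 i := by
      rw [hvals i hi, partA_self d P i hi]
    constructor
    · unfold stepA; split
      · exact hlen
      · exact (innerA_weighted d i hi P dp hlen).1
    · intro j hj
      unfold stepA
      by_cases h0 : dp.getD i 0 = 0
      · rw [if_pos h0]
        have hc0 : TT d (wlist 1 P) 0 i = 0 := by rw [← hci]; exact h0
        rcases Nat.lt_trichotomy j i with hji | hji | hji
        · rw [hvals j hj]
          unfold partA
          rw [if_pos hji, if_pos (show j < i + 1 by omega)]
        · subst hji
          rw [h0]
          unfold partA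
          rw [if_pos (show j < j + 1 by omega), hc0, mul_zero]
        · rw [hvals j hj]
          unfold partA
          rw [if_neg (show ¬ j < i by omega), if_neg (show ¬ j < i + 1 by omega)]
          have hsum : ((wlist 1 P).map (fun pm =>
              if pm.1.isSuffixOf (d.take j) = true ∧ j - pm.1.length < i
              then pm.2 * TT d (wlist 1 P) 0 (j - pm.1.length) else 0)).sum
            = ((wlist 1 P).map (fun pm =>
              if pm.1.isSuffixOf (d.take j) = true ∧ j - pm.1.length < i + 1
              then pm.2 * TT d (wlist 1 P) 0 (j - pm.1.length) else 0)).sum := by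
            refine congrArg List.sum (List.map_eq_map_iff.mpr ?_)
            intro pm hpm
            have hp1 : 0 < pm.1.length := List.length_pos_iff.mpr (wlist_ne_nil 1 P pm hpm)
            by_cases hs : pm.1.isSuffixOf (d.take j)
            · by_cases hlt : j - pm.1.length < i
              · rw [if_pos ⟨hs, hlt⟩, if_pos ⟨hs, by omega⟩]
              · by_cases heq : j - pm.1.length = i
                · rw [if_neg (fun hc => hlt hc.2), if_pos ⟨hs, by omega⟩, heq, hc0, mul_zero]
                · rw [if_neg (fun hc => hlt hc.2),
                    if_neg (fun hc => by rcases hc with ⟨_, h2⟩; omega)]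
            · rw [if_neg (fun hc => hs hc.1), if_neg (fun hc => hs hc.1)]
          rw [hsum]
      · rw [if_neg h0]
        obtain ⟨_, l2, l3⟩ := innerA_weighted d i hi P dp hlen
        by_cases hji : j = i
        · subst hji
          rw [l2, hci]
          unfold partA
          rw [if_pos (show j < j + 1 by omega)]
        · rw [l3 j hj hji, hvals j hj, hci]
          rcases Nat.lt_trichotomy j i with hlt | heq | hgt
          · have hz : ∀ x ∈ (wlist 1 P).map (fun pm =>
                if pm.1.isPrefixOf (d.drop i) = true ∧ i + pm.1.length = j
                then pm.2 * TT d (wlist 1 P) 0 i else 0), x = 0 := by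
              intro x hx
              obtain ⟨pm, hpm, rfl⟩ := List.mem_map.mp hx
              have hp1 : 0 < pm.1.length := List.length_pos_iff.mpr (wlist_ne_nil 1 P pm hpm)
              rw [if_neg (fun hc => by omega)]
            rw [List.sum_eq_zero hz, add_zero]
            unfold partA
            rw [if_pos hlt, if_pos (show j < i + 1 by omega)]
          · exact absurd heq hji
          · unfold partA
            rw [if_neg (show ¬ j < i by omega), if_neg (show ¬ j < i + 1 by omega), add_assoc,
              ← PySem.List.sum_map_add_int (wlist 1 P)
                (fun pm => if pm.1.isSuffixOf (d.take j) = true ∧ j - pm.1.length < i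
                  then pm.2 * TT d (wlist 1 P) 0 (j - pm.1.length) else 0)
                (fun pm => if pm.1.isPrefixOf (d.drop i) = true ∧ i + pm.1.length = j
                  then pm.2 * TT d (wlist 1 P) 0 i else 0)]
            have hsum : ((wlist 1 P).map (fun pm =>
                (if pm.1.isSuffixOf (d.take j) = true ∧ j - pm.1.length < i
                  then pm.2 * TT d (wlist 1 P) 0 (j - pm.1.length) else 0)
                + (if pm.1.isPrefixOf (d.drop i) = true ∧ i + pm.1.length = j
                  then pm.2 * TT d (wlist 1 P) 0 i else 0))).sum
              = ((wlist 1 P).map (fun pm =>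
                if pm.1.isSuffixOf (d.take j) = true ∧ j - pm.1.length < i + 1
                then pm.2 * TT d (wlist 1 P) 0 (j - pm.1.length) else 0)).sum := by
              refine congrArg List.sum (List.map_eq_map_iff.mpr ?_)
              intro pm hpm
              have hp1 : 0 < pm.1.length := List.length_pos_iff.mpr (wlist_ne_nil 1 P pm hpm)
              have hmi := match_iff d pm.1 i j hj (wlist_ne_nil 1 P pm hpm)
              by_cases hs : pm.1.isSuffixOf (d.take j)
              · by_cases hlt : j - pm.1.length < i
                · rw [if_pos ⟨hs, hlt⟩,
                    if_neg (fun hc => by have := (hmi.mp hc).2; omega), add_zero,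
                    if_pos ⟨hs, show j - pm.1.length < i + 1 by omega⟩]
                · by_cases heq : j - pm.1.length = i
                  · rw [if_neg (fun hc => hlt hc.2), if_pos (hmi.mpr ⟨hs, heq⟩),
                      if_pos ⟨hs, show j - pm.1.length < i + 1 by omega⟩, heq, zero_add]
                  · rw [if_neg (fun hc => hlt hc.2),
                      if_neg (fun hc => heq (hmi.mp hc).2), add_zero,
                      if_neg (fun hc => by rcases hc with ⟨_, h2⟩; omega)]
              · rw [if_neg (fun hc => hs hc.1), if_neg (fun hc => hs (hmi.mp hc).1), add_zero,
                  if_neg (fun hc => hs hc.1)]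
            rw [hsum]

lemma A_eq (d : List Char) (P : List (List Char)) :
    ((List.range d.length).foldl (stepA d P)
        ((List.replicate (d.length + 1) (0 : Int)).set 0 1)).getD d.length 0
      = TT d (wlist 1 P) 0 d.length := by
  rw [(mainA_inv d P d.length le_rfl).2 d.length le_rfl,
    partA_self d P d.length le_rfl]

-- ---------- B side: the back-to-front gather list computes TT · n ----------

lemma pfx_drop_bound (d p : List Char) (t : Nat) (hp : p ≠ [])
    (h : p.isPrefixOf (d.drop t) = true) : t + p.length ≤ d.length := by
  have h1 : 0 < p.length := List.length_pos_iff.mpr hp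
  have h2 := (List.isPrefixOf_iff_prefix.mp h).length_le
  rw [List.length_drop] at h2
  omega

lemma pyRange_down (n : Nat) :
    PySem.List.pyRange ((n : Int) - 1) (-1) (-1)
      = (List.range n).map (fun c : Nat => (n : Int) - 1 - (c : Int)) := by
  unfold PySem.List.pyRange
  rw [if_neg (by norm_num : ¬ (-1 : Int) = 0)]
  simp only [show ¬((0:Int) < -1) from by norm_num, if_false, neg_neg]
  rcases Nat.eq_zero_or_pos n with h | h
  · subst h; simp
  · rw [if_pos (by omega : (-1 : Int) < (n : Int) - 1)]
    have hc : ((((n : Int) - 1) - (-1) + 1 - 1) / 1).toNat = n := by omega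
    rw [hc]
    refine List.map_congr_left ?_
    intro c _
    ring

-- sumB as a sum over patterns
lemma sumB_eq_sum (d : List Char) (n : Nat) (ws : List Int) (i : Nat)
    (P : List (List Char)) :
    sumB d n ws i P
      = (P.map (fun p =>
          if p.isPrefixOf (d.drop i) then ws.getD (n - i - p.length) 0 else 0)).sum := by
  unfold sumB
  rw [PySem.List.foldl_congr_mem P _
      (fun acc p => acc +
        (if p.isPrefixOf (d.drop i) then ws.getD (n - i - p.length) 0 else 0)) 0
      (by
        intro acc p _
        by_cases h : p.isPrefixOf (List.drop i d) <;> simp [h]),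
    PySem.List.foldl_add, zero_add]

lemma mainB_inv (d : List Char) (P : List (List Char)) (hP : [] ∉ P) :
    ∀ k, k ≤ d.length →
      (List.range k).foldl
          (fun ws c => ws ++ [sumB d d.length ws (d.length - 1 - c) P]) [1]
        = (List.range (k + 1)).map
            (fun j => TT d (P.map (fun p => (p, (1 : Int)))) (d.length - j) d.length) := by
  have hW : ∀ pm ∈ P.map (fun p => (p, (1 : Int))), pm.1 ≠ [] := by
    intro pm hpm
    obtain ⟨p, hp, rfl⟩ := List.mem_map.mp hpm
    exact fun hc => hP (hc ▸ hp)
  intro k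
  induction k with
  | zero =>
    intro _
    simp only [List.range_zero, List.foldl_nil, List.range_succ, List.range_zero,
      List.nil_append, List.map_cons, List.map_nil]
    rw [Nat.sub_zero, TT_self]
  | succ k ih =>
    intro hk1
    have hk : k ≤ d.length := Nat.le_of_succ_le hk1
    rw [List.range_succ, List.foldl_append, List.foldl_cons, List.foldl_nil, ih hk]
    set W := P.map (fun p => (p, (1 : Int))) with hWdef
    set ws := (List.range (k + 1)).map (fun j => TT d W (d.length - j) d.length) with hws
    have hstep : sumB d d.length ws (d.length - 1 - k) P = TT d W (d.length - 1 - k) d.length := by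
      set i := d.length - 1 - k with hidef
      have hin : i ≠ d.length := by omega
      rw [sumB_eq_sum,
        TT_firstTile d W hW i d.length (by omega) le_rfl hin, seg_full, hWdef,
        List.map_map]
      refine congrArg List.sum (List.map_eq_map_iff.mpr ?_)
      intro p hp
      have hp0 : p ≠ [] := fun hc => hP (hc ▸ hp)
      have hp1 : 0 < p.length := List.length_pos_iff.mpr hp0
      by_cases hpre : p.isPrefixOf (d.drop i)
      · have hbd : i + p.length ≤ d.length := pfx_drop_bound d p i hp0 hpre
        have hjlt : d.length - i - p.length < k + 1 := by omega
        simp only [Function.comp, if_pos hpre]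
        rw [hws, PySem.List.getD_map_range _ (k + 1) _ 0 hjlt,
          show d.length - (d.length - i - p.length) = i + p.length by omega, one_mul]
      · simp only [Function.comp, if_neg hpre]
    rw [hstep, List.range_succ (n := k + 1), List.map_append, List.map_cons, List.map_nil,
      show d.length - (k + 1) = d.length - 1 - k by omega]

lemma B_eq (design : String) (patterns : List String)
    (hP : [] ∉ patterns.map String.toList) :
    count_ways_to_form_design_alt design patterns
      = TT design.toList
          ((patterns.map String.toList).map (fun p => (p, (1 : Int)))) 0
          design.toList.length := by
  show ((PySem.List.pyRange ((design.toList.length : Int) - 1) (-1) (-1)).foldl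
      (fun ws i => ws ++ [sumB design.toList design.toList.length ws i.toNat
        (patterns.map String.toList)]) [1]).getD design.toList.length 0 = _
  rw [pyRange_down, List.foldl_map,
    PySem.List.foldl_congr_mem (List.range design.toList.length) _
      (fun ws c => ws ++ [sumB design.toList design.toList.length ws
        (design.toList.length - 1 - c) (patterns.map String.toList)]) [1]
      (by
        intro ws c hc
        have hcn : c < design.toList.length := List.mem_range.mp hc
        have : ((design.toList.length : Int) - 1 - (c : Int)).toNat
            = design.toList.length - 1 - c := by omega
        rw [this]),
    mainB_inv design.toList (patterns.map String.toList) hP design.toList.length le_rfl,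
    PySem.List.getD_map_range _ (design.toList.length + 1) design.toList.length 0
      (by omega), Nat.sub_self]

-- ===== VERDICT (by name: the statement is the Claim_ definition above) =====
theorem count_ways_to_form_design_spec : Claim_equal_count_ways_to_form_design := by
  intro design patterns _ hpre
  show count_ways_to_form_design design patterns
      = count_ways_to_form_design_alt design patterns
  rcases hpre with hd | hp
  · -- empty design: both programs run no loop iteration and return the seed 1
    simp [count_ways_to_form_design, count_ways_to_form_design_alt, hd,
      PySem.List.pyRange]
  · have hP : [] ∉ patterns.map String.toList := by
      intro hc
      obtain ⟨s, hs, hse⟩ := List.mem_map.mp hc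
      exact hp s hs hse
    rw [B_eq design patterns hP]
    show ((List.range design.toList.length).foldl
        (stepA design.toList (patterns.map String.toList))
        ((List.replicate (design.toList.length + 1) (0 : Int)).set 0 1)).getD
        design.toList.length 0 = _
    rw [A_eq design.toList (patterns.map String.toList),
      wlist_one_no_nil (patterns.map String.toList) hP]
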